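-- pv_equiv track=rewrite | github.com/sohamroyc/arogyasetu | convert.py | fix_svg_attrs
-- ===== SOURCE A (Python) =====
-- def fix_svg_attrs(html_str):
--     # Fix stroke-width, stroke-dasharray, stroke-linecap, stroke-linejoin, fill-rule, clip-rule
--     svg_attrs = [
--         "stroke-width", "stroke-dasharray", "stroke-linecap", "stroke-linejoin",
--         "fill-rule", "clip-rule", "stop-color", "stop-opacity", "stroke-miterlimit",
--         "vector-effect"
--     ]
--     for attr in svg_attrs:
--         html_str = html_str.replace(attr, attr.split('-')[0] + attr.split('-')[1].capitalize())
--     return html_str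
-- ===== SOURCE B (Python) =====
-- # Single table-driven left-to-right scan instead of ten sequential full-string replace passes.
-- _ATTR_MAP = {
--     "stroke-width": "strokeWidth",
--     "stroke-dasharray": "strokeDasharray",
--     "stroke-linecap": "strokeLinecap",
--     "stroke-linejoin": "strokeLinejoin",
--     "fill-rule": "fillRule",
--     "clip-rule": "clipRule",
--     "stop-color": "stopColor",
--     "stop-opacity": "stopOpacity",
--     "stroke-miterlimit": "strokeMiterlimit",
--     "vector-effect": "vectorEffect",
-- }
--
-- def fix_svg_attrs(html_str):
--     out = []
--     i = 0
--     n = len(html_str)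
--     while i < n:
--         for attr, camel in _ATTR_MAP.items():
--             if html_str.startswith(attr, i):
--                 out.append(camel)
--                 i += len(attr)
--                 break
--         else:
--             out.append(html_str[i])
--             i += 1
--     return ''.join(out)
-- ===== Notes on version B (the rewrite author's own statement) =====
-- stated objective: alternative
-- what changed: B replaces A's ten sequential full-string .replace passes by a single left-to-right scan driven by a precomputed attribute-to-camelCase table, emitting the translation at each match.
import Mathlib
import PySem

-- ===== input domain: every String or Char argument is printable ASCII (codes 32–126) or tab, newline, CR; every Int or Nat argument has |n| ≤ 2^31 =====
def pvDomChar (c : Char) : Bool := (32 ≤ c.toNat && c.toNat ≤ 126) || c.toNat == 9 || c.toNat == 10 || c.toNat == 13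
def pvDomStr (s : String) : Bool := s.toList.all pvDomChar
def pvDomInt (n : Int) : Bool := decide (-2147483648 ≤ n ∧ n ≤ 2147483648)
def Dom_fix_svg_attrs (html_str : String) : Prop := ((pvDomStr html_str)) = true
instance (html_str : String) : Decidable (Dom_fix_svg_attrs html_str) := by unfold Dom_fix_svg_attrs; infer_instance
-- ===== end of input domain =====

-- B replaces A's ten sequential full-string replace passes by one table-driven
-- left-to-right scan (objective: alternative; equal return values proved below).

-- ===== PORT A =====
-- attr.split('-')[1].capitalize()  (the [k] index is always in range on A's literal attrs,
-- so the .getD [] default of the Option-returning pyGet? is never taken)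
def pvCapitalize (cs : List Char) : List Char :=
  match cs with
  | [] => []
  | c :: t => PySem.Chars.upperChar c :: PySem.Chars.lower t

def pvCamel (a : List Char) : List Char :=
  ((PySem.List.pyGet? (PySem.Chars.splitOn a ['-']) 0).getD []) ++
    pvCapitalize ((PySem.List.pyGet? (PySem.Chars.splitOn a ['-']) 1).getD [])

def pvSvgAttrs : List String :=
  ["stroke-width", "stroke-dasharray", "stroke-linecap", "stroke-linejoin",
   "fill-rule", "clip-rule", "stop-color", "stop-opacity", "stroke-miterlimit",
   "vector-effect"]

def fix_svg_attrs (html_str : String) : String :=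
  pvSvgAttrs.foldl
    (fun h attr => PySem.Str.replace h attr (String.ofList (pvCamel attr.toList)))
    html_str

-- ===== PORT B =====
-- the literal dict _ATTR_MAP of Source B, in insertion order
def pvTable : List (List Char × List Char) :=
  [("stroke-width".toList, "strokeWidth".toList),
   ("stroke-dasharray".toList, "strokeDasharray".toList),
   ("stroke-linecap".toList, "strokeLinecap".toList),
   ("stroke-linejoin".toList, "strokeLinejoin".toList),
   ("fill-rule".toList, "fillRule".toList),
   ("clip-rule".toList, "clipRule".toList),
   ("stop-color".toList, "stopColor".toList),
   ("stop-opacity".toList, "stopOpacity".toList),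
   ("stroke-miterlimit".toList, "strokeMiterlimit".toList),
   ("vector-effect".toList, "vectorEffect".toList)]

-- the inner `for attr, camel in _ATTR_MAP.items(): if html_str.startswith(attr, i)` loop
def pvFirstHit : List (List Char × List Char) → List Char → Option (List Char × List Char)
  | [], _ => none
  | p :: ps, l => if p.1.isPrefixOf l then some p else pvFirstHit ps l

-- the `while i < n` loop: emit camel and skip len(attr) chars on a hit, else copy one char
def pvScan (ps : List (List Char × List Char)) : List Char → List Char
  | [] => []
  | c :: cs =>
    match pvFirstHit ps (c :: cs) with
    | some p => p.2 ++ pvScan ps (cs.drop (p.1.length - 1))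
    | none => c :: pvScan ps cs
termination_by l => l.length
decreasing_by all_goals simp [List.length_drop]

def fix_svg_attrs_alt (html_str : String) : String :=
  String.ofList (pvScan pvTable html_str.toList)

-- ===== PRECONDITION & SPEC =====
def Spec_fix_svg_attrs (html_str : String) (out : String) : Prop := out = fix_svg_attrs_alt html_str
instance (html_str : String) (out : String) : Decidable (Spec_fix_svg_attrs html_str out) := by unfold Spec_fix_svg_attrs; infer_instance

-- ===== CLAIM (what is proved, stated in full; the proofs are below) =====
def Claim_equal_fix_svg_attrs : Prop := ∀ (html_str : String), Dom_fix_svg_attrs html_str → Spec_fix_svg_attrs html_str (fix_svg_attrs html_str)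

-- ===== LEMMAS AND PROOFS =====

-- simple structural model of Python's str.replace for a nonempty pattern
def pvRepM (old new : List Char) : List Char → List Char
  | [] => []
  | c :: cs =>
    if old.isPrefixOf (c :: cs) then new ++ pvRepM old new (cs.drop (old.length - 1))
    else c :: pvRepM old new cs
termination_by l => l.length
decreasing_by all_goals simp [List.length_drop]

theorem pvGo_eq (old new : List Char) (h : old ≠ []) :
    ∀ fuel l acc, l.length ≤ fuel →
      PySem.Chars.replace.go old new fuel l acc = acc.reverse ++ pvRepM old new l := by
  intro fuel
  induction fuel with
  | zero =>
    intro l acc hl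
    have : l = [] := List.eq_nil_of_length_eq_zero (Nat.le_zero.mp hl)
    subst this
    simp [PySem.Chars.replace.go, pvRepM.eq_1]
  | succ n ih =>
    intro l acc hl
    cases l with
    | nil => simp [PySem.Chars.replace.go, pvRepM.eq_1]
    | cons c cs =>
      rw [PySem.Chars.replace.go]
      simp only [List.length_cons] at hl
      obtain ⟨m, hm⟩ : ∃ m, old.length = m + 1 := ⟨old.length - 1, by
        cases old with | nil => exact absurd rfl h | cons _ _ => simp⟩
      by_cases hp : old.isPrefixOf (c :: cs)
      · simp only [hp, if_true]
        have hdrop : (c :: cs).drop old.length = cs.drop (old.length - 1) := by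
          rw [hm]; simp [List.drop_succ_cons]
        have hlen : (List.drop (old.length - 1) cs).length ≤ n := by
          rw [List.length_drop]; omega
        rw [hdrop, ih _ _ hlen]
        conv_rhs => rw [pvRepM.eq_def]
        simp [hp, List.append_assoc]
      · simp only [hp, if_false]
        have hlen : cs.length ≤ n := by omega
        rw [ih _ _ hlen]
        conv_rhs => rw [pvRepM.eq_def]
        simp [hp, List.append_assoc]

theorem pvReplace_eq (old new s : List Char) (h : old ≠ []) :
    PySem.Chars.replace s old new = pvRepM old new s := by
  rw [PySem.Chars.replace]
  simp only [List.isEmpty_iff, h, if_false]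
  rw [pvGo_eq old new h s.length s [] (le_refl _)]
  simp

theorem pvPrefix_cases (s a b : List Char) (h : a <+: s ++ b) : a <+: s ∨ s <+: a := by
  by_cases hle : a.length ≤ s.length
  · exact Or.inl (List.prefix_of_prefix_length_le h (List.prefix_append s b) hle)
  · exact Or.inr (List.prefix_of_prefix_length_le (List.prefix_append s b) h (by omega))

theorem pvFirstHit_mem {ps : List (List Char × List Char)} {l : List Char}
    {p : List Char × List Char} (h : pvFirstHit ps l = some p) : p ∈ ps ∧ p.1 <+: l := by
  induction ps with
  | nil => simp [pvFirstHit] at h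
  | cons q ps ih =>
    rw [pvFirstHit] at h
    by_cases hq : q.1.isPrefixOf l
    · simp only [hq, if_true, Option.some.injEq] at h
      subst h
      exact ⟨List.mem_cons_self, List.isPrefixOf_iff_prefix.mp hq⟩
    · simp only [hq, if_false] at h
      obtain ⟨hmem, hpre⟩ := ih h
      exact ⟨List.mem_cons_of_mem _ hmem, hpre⟩

theorem pvFirstHit_eq_none_iff {ps : List (List Char × List Char)} {l : List Char} :
    pvFirstHit ps l = none ↔ ∀ p ∈ ps, ¬ p.1 <+: l := by
  induction ps with
  | nil => simp [pvFirstHit]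
  | cons q ps ih =>
    rw [pvFirstHit]
    by_cases hq : q.1.isPrefixOf l
    · simp [hq, List.isPrefixOf_iff_prefix.mp hq]
    · simp [hq, ih, List.isPrefixOf_iff_prefix.not.mp hq]

theorem pvFirstHit_append_some {ps q : List (List Char × List Char)} {l : List Char}
    {p : List Char × List Char} (h : pvFirstHit ps l = some p) :
    pvFirstHit (ps ++ q) l = some p := by
  induction ps with
  | nil => simp [pvFirstHit] at h
  | cons r ps ih =>
    rw [List.cons_append, pvFirstHit] at ⊢
    rw [pvFirstHit] at h
    by_cases hr : r.1.isPrefixOf l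
    · simpa [hr] using h
    · simp only [hr, if_false] at h ⊢
      exact ih h

theorem pvFirstHit_append_none {ps q : List (List Char × List Char)} {l : List Char}
    (h : pvFirstHit ps l = none) : pvFirstHit (ps ++ q) l = pvFirstHit q l := by
  induction ps with
  | nil => simp [pvFirstHit]
  | cons r ps ih =>
    rw [List.cons_append, pvFirstHit] at ⊢
    rw [pvFirstHit] at h
    by_cases hr : r.1.isPrefixOf l
    · simp [hr] at h
    · simp only [hr, if_false] at h ⊢
      exact ih h

theorem pvScan_cons_some {ps : List (List Char × List Char)} {c : Char} {cs : List Char}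
    {p : List Char × List Char} (h : pvFirstHit ps (c :: cs) = some p) :
    pvScan ps (c :: cs) = p.2 ++ pvScan ps (cs.drop (p.1.length - 1)) := by
  rw [pvScan, h]

theorem pvScan_cons_none {ps : List (List Char × List Char)} {c : Char} {cs : List Char}
    (h : pvFirstHit ps (c :: cs) = none) :
    pvScan ps (c :: cs) = c :: pvScan ps cs := by
  rw [pvScan, h]

theorem pvScan_empty : ∀ l : List Char, pvScan [] l = l := by
  intro l
  induction l with
  | nil => rw [pvScan]
  | cons c cs ih =>
    rw [pvScan_cons_none (by rw [pvFirstHit.eq_def]), ih]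

-- the scan never creates a new occurrence of a pattern in front of its output
theorem pvScan_no_create (ps : List (List Char × List Char)) :
    ∀ (l s : List Char), s ≠ [] →
      (∀ s', s' <:+ s → s' ≠ [] → ∀ p ∈ ps, ¬ s' <+: p.2 ∧ ¬ p.2 <+: s') →
      ¬ s <+: l → ¬ s <+: pvScan ps l := by
  intro l
  induction l with
  | nil => intro s hs _ _ hpre; rw [pvScan] at hpre; simp [List.prefix_nil] at hpre; exact hs hpre
  | cons c cs ih =>
    intro s hs hcam hnl
    cases hfh : pvFirstHit ps (c :: cs) with
    | some p =>
      rw [pvScan_cons_some hfh]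
      intro hpre
      obtain ⟨hmem, _⟩ := pvFirstHit_mem hfh
      rcases pvPrefix_cases p.2 s _ hpre with h1 | h1
      · exact (hcam s List.suffix_rfl hs p hmem).1 h1
      · exact (hcam s List.suffix_rfl hs p hmem).2 h1
    | none =>
      rw [pvScan_cons_none hfh]
      cases s with
      | nil => exact absurd rfl hs
      | cons d t =>
        intro hpre
        rw [List.cons_prefix_cons] at hpre
        obtain ⟨rfl, ht⟩ := hpre
        cases t with
        | nil => exact hnl (by simp [List.cons_prefix_cons])
        | cons e u =>
          have hnt : ¬ (e :: u) <+: cs := by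
            intro hcon
            exact hnl (by simp [List.cons_prefix_cons, hcon])
          exact ih (e :: u) (by simp)
            (fun s' hsuf hne p hp => hcam s' (hsuf.trans (List.suffix_cons _ _)) hne p hp)
            hnt ht

-- pvRepM passes over a block in which no occurrence of the pattern can start
theorem pvRepM_push (a n : List Char) (ha : a ≠ []) :
    ∀ (b X : List Char),
      (∀ s, s <:+ b → s ≠ [] → ¬ a <+: s ∧ ¬ s <+: a) →
      pvRepM a n (b ++ X) = b ++ pvRepM a n X := by
  intro b
  induction b with
  | nil => intro X _; simp
  | cons c b' ih =>
    intro X hb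
    rw [List.cons_append, pvRepM.eq_def]
    have hnp : ¬ a.isPrefixOf (c :: (b' ++ X)) := by
      rw [List.isPrefixOf_iff_prefix]
      intro hcon
      rw [show c :: (b' ++ X) = (c :: b') ++ X from rfl] at hcon
      rcases pvPrefix_cases (c :: b') a X hcon with h1 | h1
      · exact (hb (c :: b') List.suffix_rfl (by simp)).1 h1
      · exact (hb (c :: b') List.suffix_rfl (by simp)).2 h1
    simp only [hnp, if_false, Bool.false_eq_true]
    rw [ih X (fun s hsuf hne => hb s (hsuf.trans (List.suffix_cons _ _)) hne)]
    simp

-- the scan passes over a block in which no pattern of the table can start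
theorem pvScan_push (ps : List (List Char × List Char)) :
    ∀ (b X : List Char),
      (∀ s, s <:+ b → s ≠ [] → ∀ p ∈ ps, ¬ p.1 <+: s ∧ ¬ s <+: p.1) →
      pvScan ps (b ++ X) = b ++ pvScan ps X := by
  intro b
  induction b with
  | nil => intro X _; simp
  | cons c b' ih =>
    intro X hb
    rw [List.cons_append]
    have hfh : pvFirstHit ps (c :: (b' ++ X)) = none := by
      rw [pvFirstHit_eq_none_iff]
      intro p hp hcon
      rw [show c :: (b' ++ X) = (c :: b') ++ X from rfl] at hcon
      rcases pvPrefix_cases (c :: b') p.1 X hcon with h1 | h1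
      · exact (hb (c :: b') List.suffix_rfl (by simp) p hp).1 h1
      · exact (hb (c :: b') List.suffix_rfl (by simp) p hp).2 h1
    rw [pvScan_cons_none hfh]
    rw [ih X (fun s hsuf hne => hb s (hsuf.trans (List.suffix_cons _ _)) hne)]
    simp

-- one replace pass after the scan over a compatible table extends the table
theorem pvRepScan (ps : List (List Char × List Char)) (a cam : List Char)
    (ha : a ≠ [])
    (h1 : ∀ s, s <:+ a → s ≠ [] → ∀ p ∈ ps,
        (¬ s <+: p.2 ∧ ¬ p.2 <+: s) ∧ (¬ p.1 <+: s ∧ ¬ s <+: p.1)) :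
    (∀ p ∈ ps, ∀ s, s <:+ p.2 → s ≠ [] → ¬ a <+: s ∧ ¬ s <+: a) →
    ∀ (n : Nat) (l : List Char), l.length ≤ n →
      pvRepM a cam (pvScan ps l) = pvScan (ps ++ [(a, cam)]) l := by
  intro h2 n
  induction n with
  | zero =>
    intro l hl
    have : l = [] := List.eq_nil_of_length_eq_zero (Nat.le_zero.mp hl)
    subst this
    rw [pvScan, pvScan, pvRepM.eq_1]
  | succ n ih =>
    intro l hl
    cases l with
    | nil => rw [pvScan, pvScan, pvRepM.eq_1]
    | cons c cs =>
      simp only [List.length_cons] at hl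
      cases hfh : pvFirstHit ps (c :: cs) with
      | some p =>
        obtain ⟨hmem, _⟩ := pvFirstHit_mem hfh
        rw [pvScan_cons_some hfh]
        rw [pvRepM_push a cam ha p.2 _ (fun s hsuf hne => h2 p hmem s hsuf hne)]
        have hlen : (cs.drop (p.1.length - 1)).length ≤ n := by
          rw [List.length_drop]; omega
        rw [ih _ hlen]
        rw [pvScan_cons_some (pvFirstHit_append_some hfh)]
      | none =>
        obtain ⟨d, a2, rfl⟩ : ∃ d a2, a = d :: a2 := by
          cases a with
          | nil => exact absurd rfl ha
          | cons d a2 => exact ⟨d, a2, rfl⟩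
        by_cases hap : (d :: a2) <+: c :: cs
        · -- the new pattern matches at this position
          obtain ⟨r, hr⟩ := hap
          have hscan1 : pvScan ps (c :: cs) = (d :: a2) ++ pvScan ps r := by
            rw [← hr]
            exact pvScan_push ps (d :: a2) r (fun s hsuf hne p hp => (h1 s hsuf hne p hp).2)
          have hrep : pvRepM (d :: a2) cam ((d :: a2) ++ pvScan ps r) =
              cam ++ pvRepM (d :: a2) cam (pvScan ps r) := by
            rw [List.cons_append, pvRepM.eq_def]
            have hpp : (d :: a2).isPrefixOf (d :: (a2 ++ pvScan ps r)) := by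
              rw [List.isPrefixOf_iff_prefix]
              exact ⟨pvScan ps r, by simp⟩
            simp only [hpp, if_true]
            have hdr : List.drop ((d :: a2).length - 1) (a2 ++ pvScan ps r) = pvScan ps r := by
              simp
            rw [hdr]
          have hlenr : r.length ≤ n := by
            have := congrArg List.length hr
            simp at this
            omega
          rw [hscan1, hrep, ih _ hlenr]
          have hcd : c = d ∧ a2 ++ r = cs := by
            rw [List.cons_append] at hr
            exact ⟨(List.cons.injEq _ _ _ _ ▸ hr).1.symm, (List.cons.injEq _ _ _ _ ▸ hr).2⟩
          obtain ⟨rfl, hcs⟩ := hcd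
          have hfh2 : pvFirstHit [((c :: a2), cam)] (c :: cs) = some ((c :: a2), cam) := by
            rw [pvFirstHit]
            have hpp2 : (c :: a2).isPrefixOf (c :: cs) := by
              rw [List.isPrefixOf_iff_prefix, ← hcs]
              exact ⟨r, by simp⟩
            simp [hpp2]
          rw [pvScan_cons_some (show pvFirstHit (ps ++ [((c :: a2), cam)]) (c :: cs) = _ by
            rw [pvFirstHit_append_none hfh, hfh2])]
          have hdrop : List.drop ((c :: a2).length - 1) cs = r := by
            rw [← hcs]
            simp
          rw [hdrop]
        · -- no pattern matches at this position
          have hnc : ¬ (d :: a2) <+: pvScan ps (c :: cs) :=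
            pvScan_no_create ps (c :: cs) (d :: a2) (by simp)
              (fun s' hsuf hne p hp => (h1 s' hsuf hne p hp).1) hap
          rw [pvScan_cons_none hfh] at hnc ⊢
          have hfh2 : pvFirstHit [((d :: a2), cam)] (c :: cs) = none := by
            rw [pvFirstHit_eq_none_iff]
            intro p hp
            simp at hp
            subst hp
            exact hap
          rw [pvScan_cons_none (show pvFirstHit (ps ++ [((d :: a2), cam)]) (c :: cs) = none by
            rw [pvFirstHit_append_none hfh, hfh2])]
          rw [pvRepM.eq_def]
          have hX : ¬ ((d :: a2).isPrefixOf (c :: pvScan ps cs) = true) := by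
            rw [List.isPrefixOf_iff_prefix]
            exact hnc
          simp only [hX, if_false, Bool.false_eq_true]
          rw [ih _ (by omega)]

theorem pvFoldA_toList : ∀ (as : List String) (s : String),
    (List.foldl (fun h attr => PySem.Str.replace h attr (String.ofList (pvCamel attr.toList))) s as).toList
      = List.foldl (fun h a => PySem.Chars.replace h a.toList (pvCamel a.toList)) s.toList as := by
  intro as
  induction as with
  | nil => intro s; rfl
  | cons a as ih =>
    intro s
    simp only [List.foldl_cons]
    rw [ih (PySem.Str.replace s a (String.ofList (pvCamel a.toList)))]
    rw [PySem.Str.toList_replace, String.toList_ofList]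

theorem pvFold_replace_eq_repM : ∀ (as : List String) (t : List Char),
    (∀ a ∈ as, a.toList ≠ []) →
    List.foldl (fun h a => PySem.Chars.replace h a.toList (pvCamel a.toList)) t as
      = List.foldl (fun h a => pvRepM a.toList (pvCamel a.toList) h) t as := by
  intro as
  induction as with
  | nil => intro t _; rfl
  | cons a as ih =>
    intro t hne
    simp only [List.foldl_cons]
    rw [pvReplace_eq a.toList (pvCamel a.toList) t (hne a List.mem_cons_self)]
    exact ih _ (fun b hb => hne b (List.mem_cons_of_mem _ hb))

theorem pvTable_eq : pvSvgAttrs.map (fun a => (a.toList, pvCamel a.toList)) = pvTable := by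
  decide

theorem pvHM : ∀ i, (h : i < pvTable.length) →
    pvTable[i].1 ≠ [] ∧
    (∀ s ∈ pvTable[i].1.tails, s ≠ [] → ∀ p ∈ pvTable.take i,
      (¬ s <+: p.2 ∧ ¬ p.2 <+: s) ∧ (¬ p.1 <+: s ∧ ¬ s <+: p.1)) ∧
    (∀ p ∈ pvTable.take i, ∀ s ∈ p.2.tails, s ≠ [] →
      ¬ pvTable[i].1 <+: s ∧ ¬ s <+: pvTable[i].1) := by
  decide

theorem pvChainAux : ∀ (j i : Nat), i + j = pvTable.length → ∀ l : List Char,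
    List.foldl (fun h p => pvRepM p.1 p.2 h) (pvScan (pvTable.take i) l) (pvTable.drop i)
      = pvScan pvTable l := by
  intro j
  induction j with
  | zero =>
    intro i hi l
    have : i = pvTable.length := by omega
    subst this
    simp
  | succ j ih =>
    intro i hi l
    have hlt : i < pvTable.length := by omega
    rw [List.drop_eq_getElem_cons hlt, List.foldl_cons]
    obtain ⟨hne, hA, hB⟩ := pvHM i hlt
    have hstep := pvRepScan (pvTable.take i) pvTable[i].1 pvTable[i].2 hne
        (fun s hsuf hne' p hp => hA s ((List.mem_tails _ _).mpr hsuf) hne' p hp)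
        (fun p hp s hsuf hne' => hB p hp s ((List.mem_tails _ _).mpr hsuf) hne')
        l.length l (le_refl _)
    simp only at hstep ⊢
    rw [hstep]
    have htake : pvTable.take i ++ [(pvTable[i].1, pvTable[i].2)] = pvTable.take (i + 1) := by
      rw [show ((pvTable[i].1, pvTable[i].2) : List Char × List Char) = pvTable[i] from rfl]
      rw [List.take_add_one, List.getElem?_eq_getElem hlt]
      simp
    rw [htake]
    exact ih (i + 1) (by omega) l

theorem pvChainTable (l : List Char) :
    List.foldl (fun h p => pvRepM p.1 p.2 h) l pvTable = pvScan pvTable l := by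
  have h := pvChainAux pvTable.length 0 (by simp) l
  rw [List.take_zero, List.drop_zero, pvScan_empty] at h
  exact h

-- ===== VERDICT (by name: the statement is the Claim_ definition above) =====
theorem fix_svg_attrs_spec : Claim_equal_fix_svg_attrs := by
  unfold Claim_equal_fix_svg_attrs
  intro s _
  unfold Spec_fix_svg_attrs
  apply String.toList_inj.mp
  rw [fix_svg_attrs, fix_svg_attrs_alt, String.toList_ofList]
  rw [pvFoldA_toList]
  rw [pvFold_replace_eq_repM pvSvgAttrs s.toList (by decide)]
  have hmap : List.foldl (fun h a => pvRepM a.toList (pvCamel a.toList) h) s.toList pvSvgAttrs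
      = List.foldl (fun h p => pvRepM p.1 p.2 h) s.toList pvTable := by
    rw [← pvTable_eq, List.foldl_map]
  rw [hmap]
  exact pvChainTable s.toList
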